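-- pv_equiv track=rewrite | github.com/ScrappinR/MWRASP-Quantum-Defense | MWRASP_REVOLUTIONARY_PROTOCOL_ORDER_AUTH.py | _alternating_importance
-- ===== SOURCE A (Python) =====
-- from typing import Dict, List, Optional, Tuple, Any, Set
--
-- def _alternating_importance(protocols: List[str]) -> List[str]:
--     """Alternating high-importance and low-importance protocols"""
--     # Define importance levels
--     high_importance = ['TLS_1.3', 'SSH_2.0', 'Kerberos_5', 'X.509']
--     medium_importance = ['OAuth_2.0', 'SAML_2.0', 'IPSec', 'LDAP']
--     low_importance = ['OpenID_Connect', 'RADIUS', 'PKCS_11', 'WS_Security']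
--
--     high = [p for p in protocols if p in high_importance]
--     medium = [p for p in protocols if p in medium_importance]
--     low = [p for p in protocols if p in low_importance]
--
--     # Alternate between levels
--     alternated = []
--     max_len = max(len(high), len(medium), len(low))
--
--     for i in range(max_len):
--         if i < len(high):
--             alternated.append(high[i])
--         if i < len(low):
--             alternated.append(low[i])
--         if i < len(medium):
--             alternated.append(medium[i])
--
--     return alternated
-- ===== SOURCE B (Python) =====
-- def _alternating_importance(protocols):
--     """Alternating high-importance and low-importance protocols"""
--     high_importance = ['TLS_1.3', 'SSH_2.0', 'Kerberos_5', 'X.509']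
--     medium_importance = ['OAuth_2.0', 'SAML_2.0', 'IPSec', 'LDAP']
--     low_importance = ['OpenID_Connect', 'RADIUS', 'PKCS_11', 'WS_Security']
--
--     # One pass: give each recognized protocol the interleaving key
--     # 3 * (its index within its category) + rank (high=0, low=1, medium=2),
--     # then a single stable sort by that key yields the round-robin order.
--     c_high = 0
--     c_low = 0
--     c_medium = 0
--     keyed = []
--     for p in protocols:
--         if p in high_importance:
--             keyed.append((3 * c_high + 0, p))
--             c_high += 1
--         elif p in low_importance:
--             keyed.append((3 * c_low + 1, p))
--             c_low += 1
--         elif p in medium_importance: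
--             keyed.append((3 * c_medium + 2, p))
--             c_medium += 1
--     keyed.sort(key=lambda t: t[0])
--     return [p for _, p in keyed]
-- ===== Notes on version B (the rewrite author's own statement) =====
-- stated objective: alternative
-- what changed: Instead of building three filtered lists and interleaving them with an index loop up to max length, B makes one pass over protocols assigning each recognized protocol the key 3*(its index within its importance category) + rank (high=0, low=1, medium=2) and obtains the round-robin order by one stable sort on that key.
import Mathlib
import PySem

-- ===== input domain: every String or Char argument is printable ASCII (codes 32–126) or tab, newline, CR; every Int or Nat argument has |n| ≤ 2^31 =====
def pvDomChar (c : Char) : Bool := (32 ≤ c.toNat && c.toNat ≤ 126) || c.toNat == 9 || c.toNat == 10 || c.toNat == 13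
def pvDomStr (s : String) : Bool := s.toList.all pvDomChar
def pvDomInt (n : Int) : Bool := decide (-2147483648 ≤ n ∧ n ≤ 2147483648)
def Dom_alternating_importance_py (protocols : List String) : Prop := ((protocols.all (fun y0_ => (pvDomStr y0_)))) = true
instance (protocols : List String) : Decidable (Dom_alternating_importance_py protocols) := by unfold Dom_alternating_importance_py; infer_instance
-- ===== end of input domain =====

-- B replaces A's three filtered lists + index interleaving loop by a single annotating
-- pass (key = 3 * index-within-category + rank) followed by one stable sort — an
-- alternative algorithm of similar cost, not claimed faster.


-- ===== PORT A =====
def alternating_importance_py (protocols : List String) : List String :=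
  let high_importance : List String := ["TLS_1.3", "SSH_2.0", "Kerberos_5", "X.509"]
  let medium_importance : List String := ["OAuth_2.0", "SAML_2.0", "IPSec", "LDAP"]
  let low_importance : List String := ["OpenID_Connect", "RADIUS", "PKCS_11", "WS_Security"]
  let high := protocols.filter (fun p => decide (p ∈ high_importance))
  let medium := protocols.filter (fun p => decide (p ∈ medium_importance))
  let low := protocols.filter (fun p => decide (p ∈ low_importance))
  let max_len := max (max (PySem.List.len high) (PySem.List.len medium)) (PySem.List.len low)
  (PySem.List.pyRange 0 max_len 1).foldl (fun alternated i =>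
    let alternated := if i < PySem.List.len high then alternated ++ [PySem.List.pyGetD high i ""] else alternated
    let alternated := if i < PySem.List.len low then alternated ++ [PySem.List.pyGetD low i ""] else alternated
    if i < PySem.List.len medium then alternated ++ [PySem.List.pyGetD medium i ""] else alternated) []

-- ===== PORT B =====
def alternating_importance_py_alt (protocols : List String) : List String :=
  let high_importance : List String := ["TLS_1.3", "SSH_2.0", "Kerberos_5", "X.509"]
  let medium_importance : List String := ["OAuth_2.0", "SAML_2.0", "IPSec", "LDAP"]
  let low_importance : List String := ["OpenID_Connect", "RADIUS", "PKCS_11", "WS_Security"]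
  -- one pass: key = 3 * (index within category) + rank (high = 0, low = 1, medium = 2)
  let st := protocols.foldl (fun s p =>
      if p ∈ high_importance then (s.1 + 1, s.2.1, s.2.2.1, s.2.2.2 ++ [(3 * s.1 + 0, p)])
      else if p ∈ low_importance then (s.1, s.2.1 + 1, s.2.2.1, s.2.2.2 ++ [(3 * s.2.1 + 1, p)])
      else if p ∈ medium_importance then (s.1, s.2.1, s.2.2.1 + 1, s.2.2.2 ++ [(3 * s.2.2.1 + 2, p)])
      else s)
    ((0 : Int), (0 : Int), (0 : Int), ([] : List (Int × String)))
  (PySem.List.sorted st.2.2.2 (fun t => t.1)).map (fun t => t.2)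

-- ===== PRECONDITION & SPEC =====
def Spec_alternating_importance_py (protocols : List String) (out : List String) : Prop := out = alternating_importance_py_alt protocols
instance (protocols : List String) (out : List String) : Decidable (Spec_alternating_importance_py protocols out) := by unfold Spec_alternating_importance_py; infer_instance

-- ===== CLAIM (what is proved, stated in full; the proofs are below) =====
def Claim_equal_alternating_importance_py : Prop := ∀ (protocols : List String), Dom_alternating_importance_py protocols → Spec_alternating_importance_py protocols (alternating_importance_py protocols)

-- ===== LEMMAS AND PROOFS =====

-- the three constant importance lists (proof-side names for the ports' literals)
def pvHI : List String := ["TLS_1.3", "SSH_2.0", "Kerberos_5", "X.509"]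
def pvMI : List String := ["OAuth_2.0", "SAML_2.0", "IPSec", "LDAP"]
def pvLO : List String := ["OpenID_Connect", "RADIUS", "PKCS_11", "WS_Security"]

-- disjointness of the three constant lists
lemma pv_hi_lo {p : String} (h : p ∈ pvHI) : p ∉ pvLO := by fin_cases h <;> decide
lemma pv_hi_mi {p : String} (h : p ∈ pvHI) : p ∉ pvMI := by fin_cases h <;> decide
lemma pv_lo_mi {p : String} (h : p ∈ pvLO) : p ∉ pvMI := by fin_cases h <;> decide

-- the annotated list B's single pass produces, as a structural recursion
def pvAnn : List String → Int → Int → Int → List (Int × String)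
  | [], _, _, _ => []
  | p :: ps, c0, c1, c2 =>
    if p ∈ pvHI then (3 * c0 + 0, p) :: pvAnn ps (c0 + 1) c1 c2
    else if p ∈ pvLO then (3 * c1 + 1, p) :: pvAnn ps c0 (c1 + 1) c2
    else if p ∈ pvMI then (3 * c2 + 2, p) :: pvAnn ps c0 c1 (c2 + 1)
    else pvAnn ps c0 c1 c2

-- one category, enumerated from counter c with rank r
def pvEnum (r : Int) : Int → List String → List (Int × String)
  | _, [] => []
  | c, x :: xs => (3 * c + r, x) :: pvEnum r (c + 1) xs

-- one keyed block of the round-robin target, at index k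
def pvBlk (xs : List String) (r : Int) (k : Nat) : List (Int × String) :=
  if (k : Int) < (xs.length : Int) then [(3 * (k : Int) + r, xs.getD k "")] else []

-- one unkeyed block of A's output, at index k
def pvBlkS (xs : List String) (k : Nat) : List String :=
  if (k : Int) < (xs.length : Int) then [xs.getD k ""] else []

-- B's fold produces pvAnn
lemma pv_foldl_ann (ps : List String) : ∀ (c0 c1 c2 : Int) (acc : List (Int × String)),
    (ps.foldl (fun s p =>
      if p ∈ pvHI then (s.1 + 1, s.2.1, s.2.2.1, s.2.2.2 ++ [(3 * s.1 + 0, p)])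
      else if p ∈ pvLO then (s.1, s.2.1 + 1, s.2.2.1, s.2.2.2 ++ [(3 * s.2.1 + 1, p)])
      else if p ∈ pvMI then (s.1, s.2.1, s.2.2.1 + 1, s.2.2.2 ++ [(3 * s.2.2.1 + 2, p)])
      else s) (c0, c1, c2, acc)).2.2.2 = acc ++ pvAnn ps c0 c1 c2 := by
  induction ps with
  | nil => intro c0 c1 c2 acc; simp [pvAnn]
  | cons p ps ih =>
    intro c0 c1 c2 acc
    simp only [List.foldl_cons]
    split_ifs with h0 h1 h2 <;> rw [ih] <;> simp_all [pvAnn]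

-- pvAnn is a permutation of the three enumerated categories, concatenated
lemma pv_ann_perm (ps : List String) : ∀ (c0 c1 c2 : Int),
    (pvAnn ps c0 c1 c2).Perm
      (pvEnum 0 c0 (ps.filter (fun p => decide (p ∈ pvHI)))
        ++ pvEnum 1 c1 (ps.filter (fun p => decide (p ∈ pvLO)))
        ++ pvEnum 2 c2 (ps.filter (fun p => decide (p ∈ pvMI)))) := by
  induction ps with
  | nil => intro c0 c1 c2; simp [pvAnn, pvEnum]
  | cons p ps ih =>
    intro c0 c1 c2
    by_cases h0 : p ∈ pvHI
    · have hl := pv_hi_lo h0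
      have hm := pv_hi_mi h0
      rw [pvAnn, if_pos h0]
      rw [show List.filter (fun p => decide (p ∈ pvHI)) (p :: ps) = p :: List.filter (fun p => decide (p ∈ pvHI)) ps from by simp [h0]]
      rw [show List.filter (fun p => decide (p ∈ pvLO)) (p :: ps) = List.filter (fun p => decide (p ∈ pvLO)) ps from by simp [hl]]
      rw [show List.filter (fun p => decide (p ∈ pvMI)) (p :: ps) = List.filter (fun p => decide (p ∈ pvMI)) ps from by simp [hm]]
      rw [pvEnum]
      exact (ih (c0 + 1) c1 c2).cons _
    · by_cases h1 : p ∈ pvLO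
      · have hm := pv_lo_mi h1
        rw [pvAnn, if_neg h0, if_pos h1]
        rw [show List.filter (fun p => decide (p ∈ pvHI)) (p :: ps) = List.filter (fun p => decide (p ∈ pvHI)) ps from by simp [h0]]
        rw [show List.filter (fun p => decide (p ∈ pvLO)) (p :: ps) = p :: List.filter (fun p => decide (p ∈ pvLO)) ps from by simp [h1]]
        rw [show List.filter (fun p => decide (p ∈ pvMI)) (p :: ps) = List.filter (fun p => decide (p ∈ pvMI)) ps from by simp [hm]]
        rw [pvEnum]
        exact ((ih c0 (c1 + 1) c2).cons _).trans (List.perm_middle.symm.append_right _)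
      · by_cases h2 : p ∈ pvMI
        · rw [pvAnn, if_neg h0, if_neg h1, if_pos h2]
          rw [show List.filter (fun p => decide (p ∈ pvHI)) (p :: ps) = List.filter (fun p => decide (p ∈ pvHI)) ps from by simp [h0]]
          rw [show List.filter (fun p => decide (p ∈ pvLO)) (p :: ps) = List.filter (fun p => decide (p ∈ pvLO)) ps from by simp [h1]]
          rw [show List.filter (fun p => decide (p ∈ pvMI)) (p :: ps) = p :: List.filter (fun p => decide (p ∈ pvMI)) ps from by simp [h2]]
          rw [pvEnum]
          exact ((ih c0 c1 (c2 + 1)).cons _).trans List.perm_middle.symm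
        · rw [pvAnn, if_neg h0, if_neg h1, if_neg h2]
          rw [show List.filter (fun p => decide (p ∈ pvHI)) (p :: ps) = List.filter (fun p => decide (p ∈ pvHI)) ps from by simp [h0]]
          rw [show List.filter (fun p => decide (p ∈ pvLO)) (p :: ps) = List.filter (fun p => decide (p ∈ pvLO)) ps from by simp [h1]]
          rw [show List.filter (fun p => decide (p ∈ pvMI)) (p :: ps) = List.filter (fun p => decide (p ∈ pvMI)) ps from by simp [h2]]
          exact ih c0 c1 c2

-- flatMap distributes over pointwise append, up to permutation
lemma pv_flatMap_append_perm {α β : Type} (l : List α) (f g : α → List β) :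
    (l.flatMap (fun a => f a ++ g a)).Perm (l.flatMap f ++ l.flatMap g) := by
  induction l with
  | nil => simp
  | cons a l ih =>
    simp only [List.flatMap_cons, List.append_assoc]
    refine ((ih.append_left (g a)).append_left (f a)).trans ?_
    exact List.Perm.append_left (f a) (List.perm_append_comm_assoc _ _ _)

-- the range-indexed block list of one category collapses to its enumeration
lemma pv_blk_enum (r : Int) (xs : List String) : ∀ (n : Nat) (c : Int), xs.length ≤ n →
    (List.range n).flatMap (fun (k : Nat) => if (k : Int) < (xs.length : Int)
        then [(3 * (c + (k : Int)) + r, xs.getD k "")] else []) = pvEnum r c xs := by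
  induction xs with
  | nil => intro n c _; simp [pvEnum]
  | cons x t ih =>
    intro n c hn
    have hn' : t.length + 1 ≤ n := by simpa using hn
    obtain ⟨m, rfl⟩ : ∃ m, n = m + 1 := ⟨n - 1, by omega⟩
    rw [List.range_succ_eq_map, List.flatMap_cons, List.flatMap_map]
    have h0 : ((0:Nat) : Int) < ((x :: t).length : Int) := by exact_mod_cast Nat.succ_pos t.length
    rw [if_pos h0]
    have hfun : (fun (k : Nat) => (fun (k : Nat) => if (k : Int) < ((x :: t).length : Int)
          then [(3 * (c + (k : Int)) + r, (x :: t).getD k "")] else []) (Nat.succ k))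
        = (fun (k : Nat) => if (k : Int) < (t.length : Int)
          then [(3 * ((c + 1) + (k : Int)) + r, t.getD k "")] else []) := by
      funext k
      simp only [Nat.succ_eq_add_one, List.length_cons, List.getD_cons_succ, Nat.cast_add,
        Nat.cast_one]
      by_cases hk : (k : Int) < (t.length : Int)
      · rw [if_pos (show (k : Int) + 1 < (t.length : Int) + 1 by omega), if_pos hk]
        exact congrArg (fun z => [(z, t.getD k "")]) (by ring)
      · rw [if_neg (by omega), if_neg hk]
    rw [hfun, ih m (c + 1) (by simpa using hn)]
    rw [pvEnum]
    simp only [List.singleton_append, Nat.cast_zero, List.getD_cons_zero]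
    exact congrArg (fun z => (z, x) :: pvEnum r (c + 1) t) (by ring)

-- pv_blk_enum, restated on pvBlk with counter 0
lemma pv_blk_enum' (r : Int) (xs : List String) (n : Nat) (h : xs.length ≤ n) :
    (List.range n).flatMap (fun k => pvBlk xs r k) = pvEnum r 0 xs := by
  rw [show (fun k => pvBlk xs r k) = (fun (k : Nat) => if (k : Int) < (xs.length : Int)
      then [(3 * ((0 : Int) + (k : Int)) + r, xs.getD k "")] else [])
    from funext (fun k => by simp [pvBlk])]
  exact pv_blk_enum r xs n 0 h

-- keys inside a block at index k are pinned between 3k and 3k+2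
lemma pv_blk_key_bounds {H L M : List String} {k : Nat} {x : Int × String}
    (hx : x ∈ pvBlk H 0 k ++ pvBlk L 1 k ++ pvBlk M 2 k) :
    3 * (k : Int) ≤ x.1 ∧ x.1 ≤ 3 * (k : Int) + 2 := by
  simp only [pvBlk, List.mem_append] at hx
  rcases hx with (h | h) | h <;>
    · split_ifs at h
      · simp at h
        rcases h with ⟨h1, -⟩
        omega
      · simp at h

-- the target list is strictly increasing in the key
lemma pv_target_pairwise (H L M : List String) (n : Nat) :
    ((List.range n).flatMap (fun k => pvBlk H 0 k ++ pvBlk L 1 k ++ pvBlk M 2 k)).Pairwise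
      (fun a b => a.1 < b.1) := by
  rw [List.flatMap_def]
  rw [List.pairwise_flatten]
  constructor
  · intro l hl
    simp only [List.mem_map] at hl
    obtain ⟨k, -, rfl⟩ := hl
    simp only [pvBlk]
    split_ifs <;> simp
  · rw [List.pairwise_map]
    refine List.Pairwise.imp_of_mem ?_ List.pairwise_lt_range
    intro j k _ _ hjk x hx y hy
    have hxb := pv_blk_key_bounds (H := H) (L := L) (M := M) hx
    have hyb := pv_blk_key_bounds (H := H) (L := L) (M := M) hy
    have : (j : Int) < (k : Int) := by exact_mod_cast hjk
    omega

-- snd-projection of a keyed block is the unkeyed block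
lemma pv_blk_map_snd (xs : List String) (r : Int) (k : Nat) :
    (pvBlk xs r k).map (fun t : Int × String => t.2) = pvBlkS xs k := by
  simp only [pvBlk, pvBlkS]; split_ifs <;> simp

-- A's port, flattened to the round-robin block list
lemma pvA_flat (ps : List String) :
    alternating_importance_py ps =
      (List.range (max (max (PySem.List.len (ps.filter (fun p => decide (p ∈ pvHI)))) (PySem.List.len (ps.filter (fun p => decide (p ∈ pvMI))))) (PySem.List.len (ps.filter (fun p => decide (p ∈ pvLO))))).toNat).flatMap
        (fun k => pvBlkS (ps.filter (fun p => decide (p ∈ pvHI))) k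
          ++ pvBlkS (ps.filter (fun p => decide (p ∈ pvLO))) k
          ++ pvBlkS (ps.filter (fun p => decide (p ∈ pvMI))) k) := by
  show (PySem.List.pyRange 0 (max (max (PySem.List.len (ps.filter (fun p => decide (p ∈ pvHI)))) (PySem.List.len (ps.filter (fun p => decide (p ∈ pvMI))))) (PySem.List.len (ps.filter (fun p => decide (p ∈ pvLO))))) 1).foldl
      (fun alternated i =>
        let alternated := if i < PySem.List.len (ps.filter (fun p => decide (p ∈ pvHI))) then alternated ++ [PySem.List.pyGetD (ps.filter (fun p => decide (p ∈ pvHI))) i ""] else alternated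
        let alternated := if i < PySem.List.len (ps.filter (fun p => decide (p ∈ pvLO))) then alternated ++ [PySem.List.pyGetD (ps.filter (fun p => decide (p ∈ pvLO))) i ""] else alternated
        if i < PySem.List.len (ps.filter (fun p => decide (p ∈ pvMI))) then alternated ++ [PySem.List.pyGetD (ps.filter (fun p => decide (p ∈ pvMI))) i ""] else alternated) [] = _
  set H := ps.filter (fun p => decide (p ∈ pvHI)) with hH
  set M := ps.filter (fun p => decide (p ∈ pvMI)) with hM
  set L := ps.filter (fun p => decide (p ∈ pvLO)) with hL
  set mx := max (max (PySem.List.len H) (PySem.List.len M)) (PySem.List.len L) with hmx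
  have hmx0 : mx = ((mx.toNat : Nat) : Int) := by
    have : (0:Int) ≤ PySem.List.len H := by rw [PySem.List.len_eq]; positivity
    omega
  rw [hmx0, PySem.List.pyRange_zero_natCast, List.foldl_map]
  have hbody : (fun (alternated : List String) (k : Nat) =>
      (fun (alternated : List String) (i : Int) =>
        let alternated := if i < PySem.List.len H then alternated ++ [PySem.List.pyGetD H i ""] else alternated
        let alternated := if i < PySem.List.len L then alternated ++ [PySem.List.pyGetD L i ""] else alternated
        if i < PySem.List.len M then alternated ++ [PySem.List.pyGetD M i ""] else alternated) alternated ((k : Nat) : Int))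
      = fun acc k => acc ++ (pvBlkS H k ++ pvBlkS L k ++ pvBlkS M k) := by
    funext acc k
    simp only [PySem.List.len_eq, PySem.List.pyGetD_natCast, pvBlkS]
    split_ifs <;> simp [List.append_assoc]
  rw [hbody, PySem.List.foldl_append_eq_flatMap]
  simp
  have hnn : max mx 0 = mx := by omega
  rw [hnn]

-- B's port, via pv_foldl_ann
lemma pvB_eq (ps : List String) :
    alternating_importance_py_alt ps =
      (PySem.List.sorted (pvAnn ps 0 0 0) (fun t => t.1)).map (fun t => t.2) := by
  show (PySem.List.sorted ((ps.foldl (fun s p =>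
      if p ∈ pvHI then (s.1 + 1, s.2.1, s.2.2.1, s.2.2.2 ++ [(3 * s.1 + 0, p)])
      else if p ∈ pvLO then (s.1, s.2.1 + 1, s.2.2.1, s.2.2.2 ++ [(3 * s.2.1 + 1, p)])
      else if p ∈ pvMI then (s.1, s.2.1, s.2.2.1 + 1, s.2.2.2 ++ [(3 * s.2.2.1 + 2, p)])
      else s) ((0 : Int), (0 : Int), (0 : Int), ([] : List (Int × String)))).2.2.2) (fun t => t.1)).map (fun t => t.2) = _
  rw [pv_foldl_ann]
  simp

-- ===== VERDICT (by name: the statement is the Claim_ definition above) =====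
theorem alternating_importance_py_spec : Claim_equal_alternating_importance_py := by
  intro ps _
  show alternating_importance_py ps = alternating_importance_py_alt ps
  set H := ps.filter (fun p => decide (p ∈ pvHI)) with hH
  set M := ps.filter (fun p => decide (p ∈ pvMI)) with hM
  set L := ps.filter (fun p => decide (p ∈ pvLO)) with hL
  set n := (max (max (PySem.List.len H) (PySem.List.len M)) (PySem.List.len L)).toNat with hn
  have hlen : H.length ≤ n ∧ M.length ≤ n ∧ L.length ≤ n := by
    simp only [hn, PySem.List.len_eq]
    omega
  -- the common round-robin target, with keys
  set target := (List.range n).flatMap (fun k => pvBlk H 0 k ++ pvBlk L 1 k ++ pvBlk M 2 k)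
    with htarget
  -- the sort in B produces exactly the target
  have hperm : target.Perm (pvAnn ps 0 0 0) := by
    have t1 : target.Perm ((List.range n).flatMap (fun k => pvBlk H 0 k ++ pvBlk L 1 k)
        ++ (List.range n).flatMap (fun k => pvBlk M 2 k)) :=
      pv_flatMap_append_perm (List.range n) (fun k => pvBlk H 0 k ++ pvBlk L 1 k) (fun k => pvBlk M 2 k)
    have t2 : ((List.range n).flatMap (fun k => pvBlk H 0 k ++ pvBlk L 1 k)).Perm
        ((List.range n).flatMap (fun k => pvBlk H 0 k) ++ (List.range n).flatMap (fun k => pvBlk L 1 k)) :=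
      pv_flatMap_append_perm (List.range n) (fun k => pvBlk H 0 k) (fun k => pvBlk L 1 k)
    refine (t1.trans (t2.append_right _)).trans ?_
    rw [pv_blk_enum' 0 H n hlen.1, pv_blk_enum' 1 L n hlen.2.2, pv_blk_enum' 2 M n hlen.2.1]
    exact (pv_ann_perm ps 0 0 0).symm
  have hsort : PySem.List.sorted (pvAnn ps 0 0 0) (fun t => t.1) = target :=
    PySem.List.sorted_eq_of_perm_of_pairwise_lt _ _ _ hperm (pv_target_pairwise H L M n)
  rw [pvB_eq, hsort, pvA_flat]
  rw [htarget, List.map_flatMap]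
  refine congrArg (List.flatMap · (List.range n)) (funext fun k => ?_)
  simp only [List.map_append, pv_blk_map_snd]
  rw [← hH, ← hL, ← hM]
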